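-- pv_equiv track=rewrite | github.com/andy1li/codejam | Kickstart/2020/Round G/A. Kick_Start/2020k-g-a.py | solve
-- ===== SOURCE A (Python) =====
-- def solve(text):
--     count = ans = 0
--     for i in range(len(text)-4):
--         if text[i:i+4] == 'KICK':
--             count += 1
--         elif text[i:i+5] == 'START':
--             ans += count
--     return ans
-- ===== SOURCE B (Python) =====
-- def solve(text):
--     n = len(text)
--     # pass 1: prefix-count array; pre[j] = number of KICK occurrences starting before j
--     pre = [0]
--     for i in range(n - 4):
--         pre.append(pre[-1] + (1 if text[i:i+4] == 'KICK' else 0))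
--     # pass 2: add pre[j] for every START occurrence
--     ans = 0
--     for j in range(n - 4):
--         if text[j:j+5] == 'START':
--             ans += pre[j]
--     return ans
-- ===== Notes on version B (the rewrite author's own statement) =====
-- stated objective: alternative
-- what changed: Single pass with two running accumulators replaced by two passes: first build a materialized prefix-count array of KICK occurrences, then sum the prefix counts at each START position.
import Mathlib
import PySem

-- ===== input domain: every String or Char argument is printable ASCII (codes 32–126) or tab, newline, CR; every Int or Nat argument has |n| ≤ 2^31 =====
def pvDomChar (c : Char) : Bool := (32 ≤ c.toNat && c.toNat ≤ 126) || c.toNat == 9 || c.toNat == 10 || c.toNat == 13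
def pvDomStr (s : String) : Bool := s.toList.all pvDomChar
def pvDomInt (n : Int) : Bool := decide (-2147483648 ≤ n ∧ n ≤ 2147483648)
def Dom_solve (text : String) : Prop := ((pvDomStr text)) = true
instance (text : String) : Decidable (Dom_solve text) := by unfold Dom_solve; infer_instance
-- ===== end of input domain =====

-- B replaces A's single pass with two running accumulators by two passes: a prefix-count
-- array of KICK occurrences, then a sum of prefix counts at START positions (alternative).

-- ===== PORT A =====
def solve (text : String) : Int :=
  let ca := (PySem.List.pyRange 0 (PySem.Str.len text - 4) 1).foldl
    (fun (ca : Int × Int) i =>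
      if PySem.Str.slice text (some i) (some (i + 4)) = "KICK" then (ca.1 + 1, ca.2)
      else if PySem.Str.slice text (some i) (some (i + 5)) = "START" then (ca.1, ca.2 + ca.1)
      else ca) (0, 0)
  ca.2

-- ===== PORT B =====
def solve_alt (text : String) : Int :=
  let n := PySem.Str.len text
  let pre := (PySem.List.pyRange 0 (n - 4) 1).foldl
    (fun (pre : List Int) i =>
      pre ++ [PySem.List.pyGetD pre (-1) 0 +
        (if PySem.Str.slice text (some i) (some (i + 4)) = "KICK" then 1 else 0)]) [0]
  (PySem.List.pyRange 0 (n - 4) 1).foldl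
    (fun (ans : Int) j =>
      if PySem.Str.slice text (some j) (some (j + 5)) = "START" then
        ans + PySem.List.pyGetD pre j 0
      else ans) 0

-- ===== PRECONDITION & SPEC =====
def Spec_solve (text : String) (out : Int) : Prop := out = solve_alt text
instance (text : String) (out : Int) : Decidable (Spec_solve text out) := by unfold Spec_solve; infer_instance

-- ===== CLAIM (what is proved, stated in full; the proofs are below) =====
def Claim_equal_solve : Prop := ∀ (text : String), Dom_solve text → Spec_solve text (solve text)

-- ===== LEMMAS AND PROOFS =====

-- kickAt s j: text[j:j+4] == 'KICK'; startAt s j: text[j:j+5] == 'START' (on the char list)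
def kickAt (s : List Char) (j : Nat) : Bool := decide ((s.drop j).take 4 = "KICK".toList)
def startAt (s : List Char) (j : Nat) : Bool := decide ((s.drop j).take 5 = "START".toList)

-- KK s M = number of KICKs starting below M; AA s M = A's answer over positions below M
def KK (s : List Char) : Nat → Int
  | 0 => 0
  | (M + 1) => KK s M + (if kickAt s M then 1 else 0)

def AA (s : List Char) : Nat → Int
  | 0 => 0
  | (M + 1) => AA s M + (if startAt s M then KK s M else 0)

theorem kick_not_start (s : List Char) (j : Nat) (h : kickAt s j = true) :
    startAt s j = false := by
  simp [kickAt, startAt] at *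
  intro h5
  have h4 : (s.drop j).take 4 = ['S', 'T', 'A', 'R'] := by
    rw [show (4 : Nat) = min 4 5 from rfl, ← List.take_take, h5]; rfl
  rw [h] at h4
  simp at h4

theorem slice_kick (text : String) (j : Nat) :
    (PySem.Str.slice text (some (j : Int)) (some ((j : Int) + 4)) = "KICK")
      = ((text.toList.drop j).take 4 = "KICK".toList) := by
  apply propext
  rw [← String.toList_inj]
  have h : (PySem.Str.slice text (some (j : Int)) (some ((j : Int) + 4))).toList
      = (text.toList.drop j).take 4 := by
    simp [pysem]
    rw [show ((j : Int) + 4) = ((j : Int) + ((4 : Nat) : Int)) by norm_num,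
      PySem.List.slice_natCast_add]
  rw [h]

theorem slice_start (text : String) (j : Nat) :
    (PySem.Str.slice text (some (j : Int)) (some ((j : Int) + 5)) = "START")
      = ((text.toList.drop j).take 5 = "START".toList) := by
  apply propext
  rw [← String.toList_inj]
  have h : (PySem.Str.slice text (some (j : Int)) (some ((j : Int) + 5))).toList
      = (text.toList.drop j).take 5 := by
    simp [pysem]
    rw [show ((j : Int) + 5) = ((j : Int) + ((5 : Nat) : Int)) by norm_num,
      PySem.List.slice_natCast_add]
  rw [h]

theorem kickL : "KICK".toList = ['K', 'I', 'C', 'K'] := rfl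
theorem startL : "START".toList = ['S', 'T', 'A', 'R', 'T'] := rfl

theorem loopA (text : String) (M : Nat) :
    (PySem.List.pyRange 0 (M : Int) 1).foldl
      (fun (ca : Int × Int) i =>
        if PySem.Str.slice text (some i) (some (i + 4)) = "KICK" then (ca.1 + 1, ca.2)
        else if PySem.Str.slice text (some i) (some (i + 5)) = "START" then (ca.1, ca.2 + ca.1)
        else ca) (0, 0) = (KK text.toList M, AA text.toList M) := by
  induction M with
  | zero => rw [Nat.cast_zero, PySem.List.pyRange_one_eq_nil (le_refl 0)]; simp [KK, AA]
  | succ M ih =>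
    rw [show ((M + 1 : Nat) : Int) = (M : Int) + 1 by push_cast; ring,
      PySem.List.pyRange_one_succ_right (by positivity), List.foldl_append, ih]
    simp only [List.foldl_cons, List.foldl_nil]
    simp only [slice_kick, slice_start]
    by_cases hk : kickAt text.toList M
    · have hs := kick_not_start _ _ hk
      simp only [kickAt, decide_eq_true_eq, kickL] at hk
      simp only [startAt, decide_eq_false_iff_not, startL] at hs
      simp [KK, AA, kickAt, startAt, kickL, startL, hk, hs]
    · simp only [kickAt, decide_eq_true_eq, kickL] at hk
      by_cases hs : (text.toList.drop M).take 5 = ['S', 'T', 'A', 'R', 'T'] <;>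
        simp [KK, AA, kickAt, startAt, kickL, startL, hk, hs]

-- B's first fold builds the prefix-count table [KK 0, KK 1, …, KK M]
theorem loopB1 (text : String) (M : Nat) :
    (PySem.List.pyRange 0 (M : Int) 1).foldl
      (fun (pre : List Int) i =>
        pre ++ [PySem.List.pyGetD pre (-1) 0 +
          (if PySem.Str.slice text (some i) (some (i + 4)) = "KICK" then 1 else 0)]) [0]
      = (List.range (M + 1)).map (fun t => KK text.toList t) := by
  induction M with
  | zero => rw [Nat.cast_zero, PySem.List.pyRange_one_eq_nil (le_refl 0)]; simp [KK]
  | succ M ih =>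
    rw [show ((M + 1 : Nat) : Int) = (M : Int) + 1 by push_cast; ring,
      PySem.List.pyRange_one_succ_right (by positivity), List.foldl_append, ih]
    simp only [List.foldl_cons, List.foldl_nil]
    rw [List.range_succ (n := M + 1), List.map_append]
    congr 1
    rw [List.range_succ, List.map_append]
    simp only [List.map_cons, List.map_nil]
    rw [PySem.List.pyGetD_neg_one_append_singleton]
    simp only [slice_kick]
    by_cases hk : (text.toList.drop M).take 4 = ['K', 'I', 'C', 'K'] <;>
      simp [KK, kickAt, kickL, hk]

-- B's second fold sums KK at START positions over a large-enough prefix table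
theorem loopB2 (text : String) (N M : Nat) (hMN : M ≤ N) :
    (PySem.List.pyRange 0 (M : Int) 1).foldl
      (fun (ans : Int) j =>
        if PySem.Str.slice text (some j) (some (j + 5)) = "START" then
          ans + PySem.List.pyGetD ((List.range (N + 1)).map (fun t => KK text.toList t)) j 0
        else ans) 0 = AA text.toList M := by
  induction M with
  | zero => rw [Nat.cast_zero, PySem.List.pyRange_one_eq_nil (le_refl 0)]; simp [AA]
  | succ M ih =>
    rw [show ((M + 1 : Nat) : Int) = (M : Int) + 1 by push_cast; ring,
      PySem.List.pyRange_one_succ_right (by positivity), List.foldl_append, ih (by omega)]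
    simp only [List.foldl_cons, List.foldl_nil]
    simp only [slice_start, PySem.List.pyGetD_natCast,
      PySem.List.getD_map_range _ _ _ _ (by omega : M < N + 1)]
    by_cases hs : (text.toList.drop M).take 5 = ['S', 'T', 'A', 'R', 'T'] <;>
      simp [AA, startAt, startL, hs]

-- ===== VERDICT (by name: the statement is the Claim_ definition above) =====
theorem solve_spec : Claim_equal_solve := by
  intro text _
  unfold Spec_solve solve solve_alt
  dsimp only
  by_cases h : PySem.Str.len text - 4 ≤ 0
  · rw [PySem.List.pyRange_one_eq_nil h]; rfl
  · rw [show PySem.Str.len text - 4 = (((PySem.Str.len text - 4).toNat : Nat) : Int) by omega,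
      loopA, loopB1, loopB2 text _ _ (le_refl _)]
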